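-- pv_equiv track=rewrite | github.com/amritsaha607/BTP | utils/utils.py | isMode
-- ===== SOURCE A (Python) =====
-- def isMode(mode, check):
--     """
--         Check if mode contains "check"
--     """
--     if mode=="default" or mode=="all":
--         return True
--
--     if mode.__contains__(check):
--         return True
--
--     if check.__contains__("_"):
--         check_modes = check.split("_")
--         for check_mode in check_modes:
--             if not isMode(mode, check_mode):
--                 return False
--         return True
--
--     return False
-- ===== SOURCE B (Python) =====
-- def isMode(mode, check):
--     """Flat, non-recursive version: mode 'default'/'all' matches everything;
--     otherwise check (or, failing that, each '_'-separated piece of check)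
--     must be a substring of mode."""
--     if mode in ("default", "all") or check in mode:
--         return True
--     return "_" in check and all(part in mode for part in check.split("_"))
-- ===== Notes on version B (the rewrite author's own statement) =====
-- stated objective: simpler
-- what changed: Replaces A's self-recursion over the '_'-split pieces with a flat non-recursive conditional: since split pieces never contain '_', each recursive call collapses to a plain substring test, so B is one boolean expression ('default'/'all' or check in mode, else '_' in check and every piece in mode).
import Mathlib
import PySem

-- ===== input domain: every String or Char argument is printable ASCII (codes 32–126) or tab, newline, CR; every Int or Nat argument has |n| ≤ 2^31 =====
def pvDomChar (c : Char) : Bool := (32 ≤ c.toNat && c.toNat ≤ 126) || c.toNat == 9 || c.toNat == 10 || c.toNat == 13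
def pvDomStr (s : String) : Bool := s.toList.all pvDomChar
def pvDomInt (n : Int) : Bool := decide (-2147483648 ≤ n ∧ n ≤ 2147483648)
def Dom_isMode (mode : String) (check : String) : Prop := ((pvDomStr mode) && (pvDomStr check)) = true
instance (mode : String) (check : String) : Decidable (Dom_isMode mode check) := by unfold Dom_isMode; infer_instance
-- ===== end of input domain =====

-- B replaces A's self-recursion with a flat conditional (the split pieces contain no '_',
-- so each recursive call is just a substring test); objective: simpler.

-- ===== PORT A =====

-- termination helper for the port's recursion: no piece of check.split('_') contains '_'
theorem splitOn_go_underscore_not_mem (fuel : Nat) :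
    ∀ (l cur : List Char) (acc : List (List Char)),
      l.length < fuel → '_' ∉ cur → (∀ q ∈ acc, '_' ∉ q) →
      ∀ p ∈ PySem.Chars.splitOn.go ['_'] fuel l cur acc, '_' ∉ p := by
  induction fuel with
  | zero => intro l cur acc hf; omega
  | succ n ih =>
    intro l cur acc hf hcur hacc p hp
    match l with
    | [] =>
      rw [PySem.Chars.splitOn.go] at hp
      case x_5 => omega
      simp at hp
      rcases hp with h | h
      · exact hacc p h
      · subst h; simpa using hcur
    | c :: rest =>
      rw [PySem.Chars.splitOn.go] at hp
      by_cases hpre : ['_'].isPrefixOf (c :: rest) = true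
      · rw [if_pos hpre] at hp
        refine ih _ [] _ (by simp at hf ⊢; omega) (by simp) ?_ p (by simpa using hp)
        intro q hq
        rcases List.mem_cons.mp hq with h | h
        · subst h; simpa using hcur
        · exact hacc q h
      · rw [if_neg hpre] at hp
        have hc : c ≠ '_' := by
          intro h; exact hpre (by simp [h, List.isPrefixOf])
        refine ih _ (c :: cur) _ (by simpa using hf) ?_ hacc p hp
        intro h
        rcases List.mem_cons.mp h with h | h
        · exact hc h.symm
        · exact hcur h

theorem splitOn_underscore_not_mem (cs : List Char) :
    ∀ p ∈ PySem.Chars.splitOn cs ['_'], '_' ∉ p := by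
  unfold PySem.Chars.splitOn
  exact splitOn_go_underscore_not_mem _ _ _ _ (by omega) (by simp) (by simp)

-- literal transliteration of A: the for-loop over check.split('_') with its early
-- 'return False' is the List.all over the pieces; recursion as in the Python
def isMode (mode : String) (check : String) : Bool :=
  if mode == "default" || mode == "all" then true
  else if PySem.Str.isIn check mode then true
  else if h : PySem.Str.isIn "_" check then
    (PySem.Chars.splitOn check.toList ['_']).attach.all
      (fun ⟨cm, _⟩ => isMode mode (String.ofList cm))
  else false
termination_by check.toList.count '_'
decreasing_by
  rename_i cm hcm
  have h1 : '_' ∉ cm := splitOn_underscore_not_mem check.toList cm hcm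
  have h2 : '_' ∈ check.toList := by
    have := (PySem.Str.isIn_iff_infix (sub := "_") (s := check)).mp h
    simpa using (List.singleton_infix_iff '_' check.toList).mp (by simpa using this)
  have e1 : (String.ofList cm).toList.count '_' = 0 := by
    rw [String.toList_ofList]; exact List.count_eq_zero.mpr h1
  have e2 : 0 < check.toList.count '_' := List.count_pos_iff.mpr h2
  omega

-- ===== PORT B =====
def isMode_alt (mode : String) (check : String) : Bool :=
  if (mode == "default" || mode == "all") || PySem.Str.isIn check mode then true
  else PySem.Str.isIn "_" check
       && (PySem.Chars.splitOn check.toList ['_']).all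
            (fun part => PySem.Str.isIn (String.ofList part) mode)

-- ===== PRECONDITION & SPEC =====
def Spec_isMode (mode : String) (check : String) (out : Bool) : Prop := out = isMode_alt mode check
instance (mode : String) (check : String) (out : Bool) : Decidable (Spec_isMode mode check out) := by unfold Spec_isMode; infer_instance

-- ===== CLAIM (what is proved, stated in full; the proofs are below) =====
def Claim_equal_isMode : Prop := ∀ (mode : String) (check : String), Dom_isMode mode check → Spec_isMode mode check (isMode mode check)

-- ===== LEMMAS AND PROOFS =====

-- l.attach.all over a projection is l.all (used to read A's loop pointwise)
theorem attach_all_proj {α : Type} (l : List α) (f : α → Bool) :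
    l.attach.all (fun x => f x.1) = l.all f := by simp

-- on a piece with no '_', A's recursive call reduces to a substring test
theorem isMode_no_underscore (mode : String) (p : List Char)
    (hmode : (mode == "default" || mode == "all") = false)
    (hp : '_' ∉ p) :
    isMode mode (String.ofList p) = PySem.Str.isIn (String.ofList p) mode := by
  rw [isMode, hmode]
  have h2 : PySem.Str.isIn "_" (String.ofList p) = false := by
    rw [PySem.Str.isIn_eq]
    apply (PySem.Chars.isIn_eq_false_iff _ _).mpr
    simpa using fun h => hp ((List.singleton_infix_iff '_' p).mp (by simpa using h))
  rw [PySem.Str.isIn_eq] at h2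
  have h2' : PySem.Chars.isIn ['_'] p = false := by simpa using h2
  simp [h2']


-- ===== VERDICT (by name: the statement is the Claim_ definition above) =====
theorem isMode_spec : Claim_equal_isMode := by
  intro mode check _
  unfold Spec_isMode
  rw [isMode, isMode_alt]
  by_cases h1 : (mode == "default" || mode == "all") = true
  · simp [h1]
  · have h1' : (mode == "default" || mode == "all") = false := by simpa using h1
    by_cases h2 : PySem.Str.isIn check mode = true
    · rw [PySem.Str.isIn_eq] at h2
      simp [h1', h2]
    · have h2' : PySem.Str.isIn check mode = false := by simpa using h2
      by_cases h3 : PySem.Str.isIn "_" check = true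
      · simp only [h1', Bool.false_eq_true, if_false, h2', Bool.false_or,
          h3, Bool.true_and]
        rw [dif_pos trivial]
        rw [attach_all_proj (f := fun cm => isMode mode (String.ofList cm))]
        rw [Bool.eq_iff_iff]
        simp only [List.all_eq_true]
        exact forall₂_congr fun p hp => by
          rw [isMode_no_underscore mode p h1'
            (splitOn_underscore_not_mem check.toList p hp)]
      · have h3' : PySem.Str.isIn "_" check = false := by simpa using h3
        simp only [PySem.Str.isIn_eq] at h2' h3'
        simp at h2' h3'
        simp [h1', h2', h3']
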